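-- pv_equiv track=rewrite | github.com/kenzoyan/kalacode | kalacode/memory/long_term.py | _is_transient
-- ===== SOURCE A (Python) =====
-- def _is_transient(text: str) -> bool:
--     """Heuristic filter for non-durable content."""
--     lowered = text.lower()
--     transient_markers = (
--         "?",
--         "error:",
--         "traceback",
--         "http://",
--         "https://",
--         "`",
--         "pip install",
--         "running ",
--         "done",
--         "thanks",
--     )
--     if len(lowered) < 12:
--         return True
--     return any(marker in lowered for marker in transient_markers)
-- ===== SOURCE B (Python) =====
-- _MARKERS = (
--     "?",
--     "error:",
--     "traceback",
--     "http://",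
--     "https://",
--     "`",
--     "pip install",
--     "running ",
--     "done",
--     "thanks",
-- )
--
-- def _is_transient(text: str) -> bool:
--     lowered = text.lower()
--     if len(lowered) < 12:
--         return True
--     # single left-to-right pass: at each position test whether any marker starts there
--     for i in range(len(lowered) + 1):
--         if any(lowered.startswith(m, i) for m in _MARKERS):
--             return True
--     return False
-- ===== Notes on version B (the rewrite author's own statement) =====
-- stated objective: alternative
-- what changed: Instead of running a separate substring-membership scan for each of the ten markers, B makes one left-to-right pass over the positions of the lowered text and tests at each position whether any marker starts there.
import Mathlib
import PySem

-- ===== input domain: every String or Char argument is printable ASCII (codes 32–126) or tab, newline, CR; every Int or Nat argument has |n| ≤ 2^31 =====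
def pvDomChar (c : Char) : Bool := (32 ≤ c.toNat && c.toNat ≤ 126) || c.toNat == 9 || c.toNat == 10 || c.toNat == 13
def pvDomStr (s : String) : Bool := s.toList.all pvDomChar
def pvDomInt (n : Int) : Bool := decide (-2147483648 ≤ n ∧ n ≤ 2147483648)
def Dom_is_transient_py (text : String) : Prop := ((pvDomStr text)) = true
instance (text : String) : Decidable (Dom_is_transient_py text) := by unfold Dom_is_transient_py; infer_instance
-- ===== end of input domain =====

-- B replaces ten independent 'marker in text' scans with one pass over positions,
-- testing at each position whether any marker starts there; return values proved identical.

-- shared data: the marker tuple, in A's order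
def transientMarkers : List String :=
  ["?", "error:", "traceback", "http://", "https://", "`",
   "pip install", "running ", "done", "thanks"]

-- ===== PORT A =====
def is_transient_py (text : String) : Bool :=
  let lowered := PySem.Str.lower text
  if PySem.Str.len lowered < 12 then true
  else transientMarkers.any (fun m => PySem.Str.isIn m lowered)

-- ===== PORT B =====
-- the position loop of Source B: walk the suffixes of the lowered text, at each one
-- test 'lowered.startswith(m, i)' for every marker
def scanMarkers (ms : List String) : List Char → Bool
  | [] => ms.any (fun m => PySem.Chars.startswith [] m.toList)
  | c :: t => ms.any (fun m => PySem.Chars.startswith (c :: t) m.toList) || scanMarkers ms t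

def is_transient_py_alt (text : String) : Bool :=
  let lowered := PySem.Str.lower text
  if PySem.Str.len lowered < 12 then true
  else scanMarkers transientMarkers lowered.toList

-- ===== PRECONDITION & SPEC =====
def Spec_is_transient_py (text : String) (out : Bool) : Prop := out = is_transient_py_alt text
instance (text : String) (out : Bool) : Decidable (Spec_is_transient_py text out) := by unfold Spec_is_transient_py; infer_instance

-- ===== CLAIM (what is proved, stated in full; the proofs are below) =====
def Claim_equal_is_transient_py : Prop := ∀ (text : String), Dom_is_transient_py text → Spec_is_transient_py text (is_transient_py text)

-- ===== LEMMAS AND PROOFS =====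

-- B's suffix scan finds a marker iff some marker is a prefix of some drop of s
theorem scanMarkers_true_iff (ms : List String) (s : List Char) :
    scanMarkers ms s = true ↔ ∃ m ∈ ms, ∃ j, m.toList <+: s.drop j := by
  induction s with
  | nil =>
    simp only [scanMarkers, List.any_eq_true, PySem.Chars.startswith_iff, List.drop_nil]
    exact ⟨fun ⟨m, hm, hp⟩ => ⟨m, hm, 0, hp⟩, fun ⟨m, hm, _, hp⟩ => ⟨m, hm, hp⟩⟩
  | cons c t ih =>
    simp only [scanMarkers, Bool.or_eq_true, List.any_eq_true, PySem.Chars.startswith_iff, ih]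
    constructor
    · rintro (⟨m, hm, hp⟩ | ⟨m, hm, j, hp⟩)
      · exact ⟨m, hm, 0, hp⟩
      · exact ⟨m, hm, j + 1, hp⟩
    · rintro ⟨m, hm, j, hp⟩
      cases j with
      | zero => exact Or.inl ⟨m, hm, hp⟩
      | succ j => exact Or.inr ⟨m, hm, j, hp⟩

-- A's per-marker membership test agrees with B's single scan
theorem any_isIn_eq_scanMarkers (ms : List String) (s : String) :
    ms.any (fun m => PySem.Str.isIn m s) = scanMarkers ms s.toList := by
  rcases h : scanMarkers ms s.toList with _ | _
  · rw [← Bool.not_eq_true] at h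
    rw [scanMarkers_true_iff] at h
    simp only [← Bool.not_eq_true, List.any_eq_true]
    rintro ⟨m, hm, hin⟩
    rw [PySem.Str.isIn_iff_infix, ← PySem.Chars.isIn_iff_infix,
      ← PySem.Chars.exists_prefix_drop_iff_isIn] at hin
    exact h ⟨m, hm, hin⟩
  · rw [scanMarkers_true_iff] at h
    obtain ⟨m, hm, j, hp⟩ := h
    simp only [List.any_eq_true]
    refine ⟨m, hm, ?_⟩
    rw [PySem.Str.isIn_iff_infix, ← PySem.Chars.isIn_iff_infix,
      ← PySem.Chars.exists_prefix_drop_iff_isIn]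
    exact ⟨j, hp⟩

-- ===== VERDICT (by name: the statement is the Claim_ definition above) =====
theorem is_transient_py_spec : Claim_equal_is_transient_py := by
  intro text _
  unfold Spec_is_transient_py is_transient_py is_transient_py_alt
  simp only
  split_ifs with h
  · rfl
  · exact any_isIn_eq_scanMarkers transientMarkers (PySem.Str.lower text)
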